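-- pv_equiv track=rewrite | github.com/dylanosaur/content-mill | app.py | add_line_breaks_to_content
-- ===== SOURCE A (Python) =====
-- def add_line_breaks_to_content(content):
--     # Split the content at each period
--     content_lines = content.split('.')
--
--     # Initialize a list to store the processed lines
--     processed_content = []
--
--     # Iterate through the lines and add a line break after every fourth period
--     for i in range(len(content_lines)):
--         if i > 0 and i % 4 == 0:
--             processed_content.append('\n')
--         processed_content.append(content_lines[i] + '.' if i < len(content_lines) - 1 else content_lines[i])
--
--     # Join the processed lines back into a single string
--     return ''.join(processed_content)
-- ===== SOURCE B (Python) =====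
-- def add_line_breaks_to_content(content):
--     # One pass over the characters: copy each char, count periods,
--     # and emit '\n' right after every fourth period.
--     out = []
--     periods = 0
--     for ch in content:
--         out.append(ch)
--         if ch == '.':
--             periods += 1
--             if periods % 4 == 0:
--                 out.append('\n')
--     return ''.join(out)
-- ===== Notes on version B (the rewrite author's own statement) =====
-- stated objective: simpler
-- what changed: Replaces split-on-period plus indexed reconstruction of the pieces with a single character scan that keeps a period counter and emits a newline right after every fourth period.
import Mathlib
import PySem

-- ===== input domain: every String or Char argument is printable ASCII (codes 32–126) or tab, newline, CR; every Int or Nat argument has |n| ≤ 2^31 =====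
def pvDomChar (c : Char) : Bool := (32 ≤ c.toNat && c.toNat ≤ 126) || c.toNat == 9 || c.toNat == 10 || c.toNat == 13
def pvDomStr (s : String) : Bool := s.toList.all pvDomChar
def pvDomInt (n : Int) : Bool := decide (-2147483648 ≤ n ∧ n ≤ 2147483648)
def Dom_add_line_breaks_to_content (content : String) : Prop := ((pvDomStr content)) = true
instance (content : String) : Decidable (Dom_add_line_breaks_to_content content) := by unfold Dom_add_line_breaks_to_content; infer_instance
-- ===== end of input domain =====

-- B simplifies A: one character scan with a period counter instead of split('.') plus indexed reconstruction.

-- ===== PORT A =====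
def add_line_breaks_to_content (content : String) : String :=
  let content_lines := PySem.Chars.splitOn content.toList ['.']
  let processed : List (List Char) :=
    (PySem.List.pyRange 0 (PySem.List.len content_lines) 1).foldl
      (fun acc i =>
        let acc := if 0 < i ∧ PySem.Int.mod i 4 = 0 then acc ++ [['\n']] else acc
        acc ++ [if i < PySem.List.len content_lines - 1
                then PySem.List.pyGetD content_lines i [] ++ ['.']
                else PySem.List.pyGetD content_lines i []])
      []
  String.ofList (PySem.Chars.join [] processed)

-- ===== PORT B =====
def add_line_breaks_to_content_alt (content : String) : String :=
  let fin := content.toList.foldl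
    (fun (st : List Char × Nat) ch =>
      let out := st.1 ++ [ch]
      if ch = '.' then
        let periods := st.2 + 1
        (if periods % 4 = 0 then out ++ ['\n'] else out, periods)
      else (out, st.2))
    ([], 0)
  String.ofList fin.1

-- ===== PRECONDITION & SPEC =====
def Spec_add_line_breaks_to_content (content : String) (out : String) : Prop := out = add_line_breaks_to_content_alt content
instance (content : String) (out : String) : Decidable (Spec_add_line_breaks_to_content content out) := by unfold Spec_add_line_breaks_to_content; infer_instance

-- ===== CLAIM (what is proved, stated in full; the proofs are below) =====
def Claim_equal_add_line_breaks_to_content : Prop := ∀ (content : String), Dom_add_line_breaks_to_content content → Spec_add_line_breaks_to_content content (add_line_breaks_to_content content)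

-- ===== LEMMAS AND PROOFS =====

-- reference splitter: s.split('.') on char lists
def pvSplit : List Char → List (List Char)
  | [] => [[]]
  | c :: t =>
    if c = '.' then [] :: pvSplit t
    else match pvSplit t with
         | p :: ps => (c :: p) :: ps
         | [] => [[c]]

def pvModHead (pre : List Char) : List (List Char) → List (List Char)
  | [] => [pre]
  | p :: ps => (pre ++ p) :: ps

def pvJoinDot : List (List Char) → List Char
  | [] => []
  | [p] => p
  | p :: ps => p ++ '.' :: pvJoinDot ps

-- the pieces A appends, starting at part index k
def pvNl (k : Nat) : List Char := if 0 < k ∧ k % 4 = 0 then ['\n'] else []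

def pvPieces : List (List Char) → Nat → List (List Char)
  | [], _ => []
  | p :: rest, k =>
    (if 0 < k ∧ k % 4 = 0 then [['\n']] else []) ++
    [if rest = [] then p else p ++ ['.']] ++ pvPieces rest (k + 1)

-- newline placed after the period instead (B's shape)
def pvOut : List (List Char) → Nat → List Char
  | [], _ => []
  | [p], _ => p
  | p :: rest, k => p ++ '.' :: ((if (k + 1) % 4 = 0 then ['\n'] else []) ++ pvOut rest (k + 1))

-- B's scan, with k periods already seen
def pvBout : List Char → Nat → List Char
  | [], _ => []
  | c :: t, k =>
    if c = '.' then '.' :: ((if (k + 1) % 4 = 0 then ['\n'] else []) ++ pvBout t (k + 1))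
    else c :: pvBout t k

theorem pvSplit_ne_nil (l : List Char) : pvSplit l ≠ [] := by
  cases l with
  | nil => simp [pvSplit]
  | cons c t =>
    simp only [pvSplit]
    split
    · simp
    · split <;> simp


theorem pvSplitOn_go (fuel : Nat) (l cur : List Char) (acc : List (List Char)) (h : l.length ≤ fuel) :
    PySem.Chars.splitOn.go ['.'] fuel l cur acc
      = acc.reverse ++ pvModHead cur.reverse (pvSplit l) := by
  induction fuel generalizing l cur acc with
  | zero =>
    interval_cases hl : l.length
    cases l with
    | nil => simp [PySem.Chars.splitOn.go, pvSplit, pvModHead]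
    | cons c t => simp at hl
  | succ fuel ih =>
    cases l with
    | nil => simp [PySem.Chars.splitOn.go, pvSplit, pvModHead]
    | cons c t =>
      rw [PySem.Chars.splitOn.go]
      by_cases hc : c = '.'
      · subst hc
        rw [if_pos (by simp [List.isPrefixOf])]
        have hd : List.drop ['.'].length ('.' :: t) = t := rfl
        rw [hd, ih t [] (List.reverse cur :: acc) (by simp at h; omega)]
        cases hps : pvSplit t with
        | nil => exact absurd hps (pvSplit_ne_nil t)
        | cons p ps =>
          simp [pvSplit, hps, pvModHead]
      · rw [if_neg (by simp [List.isPrefixOf]; exact fun e => hc e.symm)]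
        rw [ih t (c :: cur) acc (by simp at h; omega)]
        cases hps : pvSplit t with
        | nil => exact absurd hps (pvSplit_ne_nil t)
        | cons p ps =>
          simp [pvSplit, if_neg hc, hps, pvModHead]

theorem pvSplitOn_eq (s : List Char) : PySem.Chars.splitOn s ['.'] = pvSplit s := by
  rw [PySem.Chars.splitOn, pvSplitOn_go (s.length + 1) s [] [] (by omega)]
  cases hps : pvSplit s with
  | nil => exact absurd hps (pvSplit_ne_nil s)
  | cons p ps => simp [pvModHead]

theorem pvSplit_join (s : List Char) : pvJoinDot (pvSplit s) = s := by
  induction s with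
  | nil => rfl
  | cons c t ih =>
    by_cases hc : c = '.'
    · subst hc
      cases hps : pvSplit t with
      | nil => exact absurd hps (pvSplit_ne_nil t)
      | cons p ps =>
        rw [hps] at ih
        simp only [pvSplit, hps]
        show pvJoinDot ([] :: p :: ps) = '.' :: t
        simp [pvJoinDot, ih]
    · simp only [pvSplit, if_neg hc]
      cases hps : pvSplit t with
      | nil => exact absurd hps (pvSplit_ne_nil t)
      | cons p ps =>
        cases ps with
        | nil => rw [hps] at ih; simpa [pvJoinDot] using congrArg (c :: ·) ih
        | cons q qs => rw [hps] at ih; simpa [pvJoinDot] using congrArg (c :: ·) ih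


theorem pvSplit_no_dot (s : List Char) : ∀ p ∈ pvSplit s, '.' ∉ p := by
  induction s with
  | nil => simp [pvSplit]
  | cons c t ih =>
    by_cases hc : c = '.'
    · subst hc; simp only [pvSplit, reduceIte]
      intro p hp
      rcases List.mem_cons.mp hp with hp | hp
      · simp [hp]
      · exact ih p hp
    · simp only [pvSplit, if_neg hc]
      cases hps : pvSplit t with
      | nil => exact absurd hps (pvSplit_ne_nil t)
      | cons q qs =>
        rw [hps] at ih
        intro p hp
        rcases List.mem_cons.mp hp with hp | hp
        · subst hp
          intro hmem
          rcases List.mem_cons.mp hmem with h | h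
          · exact hc h.symm
          · exact ih q (by simp) h
        · exact ih p (List.mem_cons_of_mem _ hp)


theorem pvPieces_flatten (ps : List (List Char)) (k : Nat) (hne : ps ≠ []) :
    (pvPieces ps k).flatten = pvNl k ++ pvOut ps k := by
  induction ps generalizing k with
  | nil => exact absurd rfl hne
  | cons p rest ih =>
    cases rest with
    | nil =>
      simp only [pvPieces, pvOut, pvNl]
      split <;> simp
    | cons q qs =>
      have hr : (q :: qs : List (List Char)) ≠ [] := by simp
      rw [show pvPieces (p :: q :: qs) k
            = (if 0 < k ∧ k % 4 = 0 then [['\n']] else []) ++ [p ++ ['.']] ++ pvPieces (q :: qs) (k + 1)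
          from by simp [pvPieces]]
      rw [List.flatten_append, List.flatten_append, ih (k + 1) hr]
      by_cases h4 : (k + 1) % 4 = 0 <;> by_cases hk : 0 < k ∧ k % 4 = 0 <;>
        simp [pvNl, pvOut, h4, hk]

theorem pvBout_append (p rest : List Char) (k : Nat) (h : '.' ∉ p) :
    pvBout (p ++ rest) k = p ++ pvBout rest k := by
  induction p generalizing k with
  | nil => rfl
  | cons c t ih =>
    have hc : c ≠ '.' := fun e => h (by simp [e])
    have ht : '.' ∉ t := fun e => h (List.mem_cons_of_mem _ e)
    simp only [List.cons_append, pvBout, if_neg hc]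
    exact congrArg (c :: ·) (ih k ht)


theorem pvBout_joinDot (ps : List (List Char)) (k : Nat)
    (h : ∀ p ∈ ps, '.' ∉ p) : pvBout (pvJoinDot ps) k = pvOut ps k := by
  induction ps generalizing k with
  | nil => rfl
  | cons p rest ih =>
    have hp : '.' ∉ p := h p (by simp)
    cases rest with
    | nil =>
      have hb := pvBout_append p [] k hp
      simpa [pvJoinDot, pvOut, pvBout] using hb
    | cons q qs =>
      show pvBout (p ++ '.' :: pvJoinDot (q :: qs)) k = pvOut (p :: q :: qs) k
      rw [pvBout_append p _ k hp]
      show p ++ ('.' :: ((if (k + 1) % 4 = 0 then ['\n'] else []) ++ pvBout (pvJoinDot (q :: qs)) (k + 1))) = _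
      rw [ih (k + 1) (fun x hx => h x (List.mem_cons_of_mem _ hx))]
      rfl

theorem pvFoldA (ps tail : List (List Char)) (k : Nat) (acc : List (List Char))
    (hlen : k + tail.length = ps.length) :
    (PySem.List.enumerate tail (k : Int)).foldl
      (fun acc pr =>
        let acc := if 0 < pr.1 ∧ PySem.Int.mod pr.1 4 = 0 then acc ++ [['\n']] else acc
        acc ++ [if pr.1 < PySem.List.len ps - 1 then pr.2 ++ ['.'] else pr.2]) acc
      = acc ++ pvPieces tail k := by
  induction tail generalizing k acc with
  | nil => simp [PySem.List.enumerate_nil, pvPieces]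
  | cons p rest ih =>
    rw [PySem.List.enumerate_cons, List.foldl_cons]
    have hk4 : (0 < (k : Int) ∧ PySem.Int.mod (k : Int) 4 = 0) ↔ (0 < k ∧ k % 4 = 0) := by
      rw [PySem.Int.mod, Int.fmod_eq_emod]
      simp
      omega
    have hlenlist : PySem.List.len ps = (ps.length : Int) := rfl
    have hlast : ((k : Int) < PySem.List.len ps - 1) ↔ rest ≠ [] := by
      rw [hlenlist]
      constructor
      · intro hlt hrnil
        subst hrnil
        simp at hlen
        omega
      · intro hrne
        have h0 : 0 < rest.length := List.length_pos_iff.mpr hrne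
        simp only [List.length_cons] at hlen
        omega
    have hstep : ((k : Int) + 1) = ((k + 1 : Nat) : Int) := by push_cast; ring
    have hlen' : (k + 1) + rest.length = ps.length := by
      simp only [List.length_cons] at hlen
      omega
    by_cases hr : rest = []
    · subst hr
      have hnolast : ¬ ((k : Int) < PySem.List.len ps - 1) := fun hh => (hlast.mp hh) rfl
      by_cases hk : 0 < k ∧ k % 4 = 0
      · simp only [if_pos (hk4.mpr hk), if_neg hnolast]
        simp [PySem.List.enumerate_nil, pvPieces, hk]
      · simp only [if_neg (fun hh => hk (hk4.mp hh)), if_neg hnolast]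
        simp [PySem.List.enumerate_nil, pvPieces, hk]
    · by_cases hk : 0 < k ∧ k % 4 = 0
      · simp only [if_pos (hk4.mpr hk), if_pos (hlast.mpr hr)]
        rw [hstep, ih (k + 1) _ hlen']
        simp [pvPieces, hk, hr]
      · simp only [if_neg (fun hh => hk (hk4.mp hh)), if_pos (hlast.mpr hr)]
        rw [hstep, ih (k + 1) _ hlen']
        simp [pvPieces, hk, hr]

theorem pvFoldB (s : List Char) (acc : List Char) (k : Nat) :
    (s.foldl
      (fun (st : List Char × Nat) ch =>
        let out := st.1 ++ [ch]
        if ch = '.' then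
          let periods := st.2 + 1
          (if periods % 4 = 0 then out ++ ['\n'] else out, periods)
        else (out, st.2)) (acc, k)).1 = acc ++ pvBout s k := by
  induction s generalizing acc k with
  | nil => simp [pvBout]
  | cons c t ih =>
    simp only [List.foldl_cons]
    by_cases hc : c = '.'
    · subst hc
      by_cases h4 : (k + 1) % 4 = 0
      · simpa [pvBout, h4, ih] using ih (acc ++ ['.'] ++ ['\n']) (k + 1)
      · simpa [pvBout, h4, ih] using ih (acc ++ ['.']) (k + 1)
    · simpa [pvBout, hc] using ih (acc ++ [c]) k

theorem pvJoin_nil_flatten (l : List (List Char)) : PySem.Chars.join [] l = l.flatten := by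
  induction l with
  | nil => rfl
  | cons p ps ih =>
    cases ps with
    | nil => simp [PySem.Chars.join, List.intercalate]
    | cons q qs =>
      simp only [PySem.Chars.join, List.intercalate, List.intersperse] at *
      simp_all

-- ===== VERDICT (by name: the statement is the Claim_ definition above) =====
theorem add_line_breaks_to_content_spec : Claim_equal_add_line_breaks_to_content := by
  intro content _
  unfold Spec_add_line_breaks_to_content add_line_breaks_to_content add_line_breaks_to_content_alt
  rw [pvSplitOn_eq]
  have hB : (content.toList.foldl
      (fun (st : List Char × Nat) ch =>
        let out := st.1 ++ [ch]
        if ch = '.' then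
          let periods := st.2 + 1
          (if periods % 4 = 0 then out ++ ['\n'] else out, periods)
        else (out, st.2)) ([], 0)).1 = pvBout content.toList 0 := by
    simpa using pvFoldB content.toList [] 0
  have hA := pvFoldA (pvSplit content.toList) (pvSplit content.toList) 0 [] (by simp)
  rw [Nat.cast_zero, PySem.List.enumerate_eq_map_pyRange _ ([] : List Char), List.foldl_map] at hA
  simp only [List.nil_append] at hA
  dsimp only at hA hB ⊢
  rw [hA, hB, pvJoin_nil_flatten,
      pvPieces_flatten _ 0 (pvSplit_ne_nil content.toList),
      ← pvBout_joinDot _ 0 (pvSplit_no_dot content.toList),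
      pvSplit_join]
  simp [pvNl]
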